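-- pv_equiv track=rewrite | github.com/AriseOS/arise-desktop | src/intent_builder/extractors/intent_extractor.py | _split_by_url
-- ===== SOURCE A (Python) =====
-- from typing import Any, Dict, List
--
-- def _split_by_url(
--
--     operations: List[Dict[str, Any]]
-- ) -> List[List[Dict[str, Any]]]:
--     """Split operations into segments based on URL changes
--
--     Rule: When a 'navigate' operation has a different URL than previous,
--     add the navigate to current segment (as it's the result of previous actions),
--     then start a new segment from the NEXT operation.
--
--     Args:
--         operations: List of operation dictionaries
--
--     Returns:
--         List of operation segments
--
--     Example:
--         >>> ops = [
--         ...     {"type": "navigate", "url": "https://example.com/page1"},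
--         ...     {"type": "click", "url": "https://example.com/page1"},
--         ...     {"type": "navigate", "url": "https://example.com/page2"},  # goes to current segment
--         ...     {"type": "click", "url": "https://example.com/page2"},     # starts new segment
--         ... ]
--         >>> segments = extractor._split_by_url(ops)
--         >>> len(segments)
--         2
--         >>> len(segments[0])
--         3  # navigate, click, navigate
--         >>> len(segments[1])
--         1  # click
--     """
--     if not operations:
--         return []
--
--     segments = []
--     current_segment = [operations[0]]
--     last_url = operations[0].get("url")
--     start_new_segment = False
--
--     for op in operations[1:]:
--         url = op.get("url")
--         op_type = op.get("type")
--
--         # If previous operation triggered a segment split, start new segment now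
--         if start_new_segment:
--             segments.append(current_segment)
--             current_segment = [op]
--             start_new_segment = False
--             if url:
--                 last_url = url
--         # Check if URL changed (and it's a navigate operation)
--         elif op_type == "navigate" and url and last_url and url != last_url:
--             # Add navigate to current segment (it's the result of previous action)
--             current_segment.append(op)
--             last_url = url
--             # Mark that next operation should start a new segment
--             start_new_segment = True
--         else:
--             # Same URL or no URL, continue segment
--             current_segment.append(op)
--             if url:
--                 last_url = url
--
--     # Add last segment
--     if current_segment:
--         segments.append(current_segment)
--
--     return segments
-- ===== SOURCE B (Python) =====
-- from typing import Any, Dict, List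
--
--
-- def _split_by_url(
--     operations: List[Dict[str, Any]]
-- ) -> List[List[Dict[str, Any]]]:
--     """Split operations into URL-change segments by repeatedly locating the
--     next breaking navigate and slicing: a helper scans for the index of the
--     first navigate-with-changed-URL (the op right after the current segment's
--     head is the first one checked), then the segment is the slice up to and
--     including that navigate and the search restarts on the remainder."""
--
--     def seg_end(ops, last):
--         """Index in ops of the first breaking navigate, or None."""
--         k = 0
--         for op in ops:
--             u = op.get("url")
--             if op.get("type") == "navigate" and u and last and u != last:
--                 return k
--             if u:
--                 last = u
--             k += 1
--         return None
--
--     segments = []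
--     rest = operations
--     last = None
--     while rest:
--         head, tail = rest[0], rest[1:]
--         u0 = head.get("url")
--         if u0:
--             last = u0
--         k = seg_end(tail, last)
--         if k is None:
--             segments.append(rest)
--             rest = []
--         else:
--             segments.append(rest[:k + 2])  # head + tail[:k] + the navigate
--             last = tail[k].get("url")
--             rest = tail[k + 1:]
--     return segments
-- ===== Notes on version B (the rewrite author's own statement) =====
-- stated objective: alternative
-- what changed: B replaces A's single fold that grows per-segment lists with flag-delayed splitting by an outer slicing loop: a helper scans for the index of the next breaking navigate (the segment head being exempt by construction), and the segment is cut out of the original list in one slice up to and including that navigate.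
import Mathlib
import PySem

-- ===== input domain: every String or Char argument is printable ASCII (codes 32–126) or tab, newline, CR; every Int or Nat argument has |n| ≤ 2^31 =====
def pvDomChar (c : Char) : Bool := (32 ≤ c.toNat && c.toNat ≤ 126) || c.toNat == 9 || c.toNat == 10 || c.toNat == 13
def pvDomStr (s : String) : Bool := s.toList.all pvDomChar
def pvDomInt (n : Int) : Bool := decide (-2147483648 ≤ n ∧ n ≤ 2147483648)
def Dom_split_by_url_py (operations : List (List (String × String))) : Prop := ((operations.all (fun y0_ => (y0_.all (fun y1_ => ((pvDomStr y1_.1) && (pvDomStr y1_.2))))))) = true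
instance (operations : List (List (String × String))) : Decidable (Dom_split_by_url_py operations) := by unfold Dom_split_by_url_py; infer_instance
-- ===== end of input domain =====

-- B replaces A's single state-machine fold by an outer slicing loop driven by a
-- scan for the next breaking navigate; objective: alternative (same O(n) cost).

-- shared primitive helpers (Python semantics of dict.get and truthiness)
-- op.get(k) on the association-list encoding of a dict: first match
def pvGet (op : List (String × String)) (k : String) : Option String :=
  (op.find? (fun p => p.1 == k)).map (·.2)

-- Python truthiness of an Optional[str]: None and "" are falsy
def pvTruthy (o : Option String) : Bool := o.getD "" != ""

-- ===== PORT A =====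
-- loop body of A: state = (segments, current_segment, last_url, start_new_segment)
def pvStepA (st : List (List (List (String × String))) × List (List (String × String)) × Option String × Bool)
    (op : List (String × String)) :
    List (List (List (String × String))) × List (List (String × String)) × Option String × Bool :=
  let url := pvGet op "url"
  if st.2.2.2 then
    (st.1 ++ [st.2.1], [op], if pvTruthy url then url else st.2.2.1, false)
  else if pvGet op "type" == some "navigate" && pvTruthy url && pvTruthy st.2.2.1 && url != st.2.2.1 then
    (st.1, st.2.1 ++ [op], url, true)
  else
    (st.1, st.2.1 ++ [op], if pvTruthy url then url else st.2.2.1, false)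

def split_by_url_py (operations : List (List (String × String))) : List (List (List (String × String))) :=
  match operations with
  | [] => []
  | op0 :: rest =>
    let st := rest.foldl pvStepA ([], [op0], pvGet op0 "url", false)
    -- "if current_segment: segments.append(current_segment)"
    st.1 ++ (if st.2.1.isEmpty then [] else [st.2.1])

-- ===== PORT B =====
-- seg_end(ops, last): counter loop with early return, as counter-carrying recursion;
-- returns the index (counted by k) of the first breaking navigate, or none
def pvSegEnd : List (List (String × String)) → Option String → Nat → Option Nat
  | [], _, _ => none
  | op :: rest, last, k =>
    let u := pvGet op "url"
    if pvGet op "type" == some "navigate" && pvTruthy u && pvTruthy last && u != last then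
      some k
    else
      pvSegEnd rest (if pvTruthy u then u else last) (k + 1)

-- the while loop over `rest`, as recursion on the shrinking remainder;
-- rest[:k+2] = head :: tail.take (k+1); tail[k] via getD (k < tail.length whenever
-- pvSegEnd returns some k, so the default is never selected); tail[k+1:] = drop (k+1)
def pvBuild : List (List (String × String)) → Option String → List (List (List (String × String)))
  | [], _ => []
  | head :: tail, last =>
    let u0 := pvGet head "url"
    let last1 := if pvTruthy u0 then u0 else last
    match pvSegEnd tail last1 0 with
    | none => [head :: tail]
    | some k =>
      (head :: tail.take (k + 1)) ::
        pvBuild (tail.drop (k + 1)) (pvGet (tail.getD k []) "url")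
termination_by ops _ => ops.length
decreasing_by
  simp only [List.length_drop, List.length_cons]
  omega

def split_by_url_py_alt (operations : List (List (String × String))) : List (List (List (String × String))) :=
  pvBuild operations none

-- ===== PRECONDITION & SPEC =====
def Spec_split_by_url_py (operations : List (List (String × String))) (out : List (List (List (String × String)))) : Prop := out = split_by_url_py_alt operations
instance (operations : List (List (String × String))) (out : List (List (List (String × String)))) : Decidable (Spec_split_by_url_py operations out) := by unfold Spec_split_by_url_py; infer_instance

-- ===== CLAIM (what is proved, stated in full; the proofs are below) =====
def Claim_equal_split_by_url_py : Prop := ∀ (operations : List (List (String × String))), Dom_split_by_url_py operations → Spec_split_by_url_py operations (split_by_url_py operations)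

-- ===== LEMMAS AND PROOFS =====

-- reference recursion: the segmentation A's fold computes
def pvSplitRec (cur : List (List (String × String))) (l : Option String) (p : Bool) :
    List (List (String × String)) → List (List (List (String × String)))
  | [] => [cur]
  | op :: rest =>
    let url := pvGet op "url"
    if p then
      cur :: pvSplitRec [op] (if pvTruthy url then url else l) false rest
    else if pvGet op "type" == some "navigate" && pvTruthy url && pvTruthy l && url != l then
      pvSplitRec (cur ++ [op]) url true rest
    else
      pvSplitRec (cur ++ [op]) (if pvTruthy url then url else l) false rest

theorem pvA_eq (rest : List (List (String × String))) :
    ∀ (segs : List (List (List (String × String)))) (cur : List (List (String × String)))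
      (l : Option String) (p : Bool), cur ≠ [] →
    (let st := rest.foldl pvStepA (segs, cur, l, p)
     st.1 ++ (if st.2.1.isEmpty then [] else [st.2.1])) = segs ++ pvSplitRec cur l p rest := by
  induction rest with
  | nil =>
    intro segs cur l p hc
    simp [pvSplitRec, List.isEmpty_iff, hc]
  | cons op rest ih =>
    intro segs cur l p hc
    have hne : cur ++ [op] ≠ [] := by simp
    simp only [List.foldl_cons, pvStepA, pvSplitRec]
    cases p with
    | true =>
      simp only [if_true]
      rw [ih _ _ _ _ (List.cons_ne_nil op [])]
      simp
    | false =>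
      simp only [Bool.false_eq_true, if_false]
      by_cases hg : (pvGet op "type" == some "navigate" && pvTruthy (pvGet op "url")
          && pvTruthy l && pvGet op "url" != l) = true
      · rw [if_pos hg, if_pos hg, ih _ _ _ _ hne]
      · rw [if_neg hg, if_neg hg, ih _ _ _ _ hne]

-- pvSplitRec only inspects a falsy last_url through its truthiness
theorem pvSplitRec_falsy (rest : List (List (String × String))) :
    ∀ (cur : List (List (String × String))) (l l' : Option String) (p : Bool),
    pvTruthy l = false → pvTruthy l' = false →
    pvSplitRec cur l p rest = pvSplitRec cur l' p rest := by
  induction rest with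
  | nil => intro cur l l' p _ _; rfl
  | cons op rest ih =>
    intro cur l l' p hl hl'
    simp only [pvSplitRec]
    cases p with
    | true =>
      cases hu : pvTruthy (pvGet op "url") with
      | true => simp
      | false =>
        simp only [if_true, Bool.false_eq_true, if_false]
        rw [ih [op] l l' false hl hl']
    | false =>
      cases hu : pvTruthy (pvGet op "url") with
      | true => simp [hl, hl']
      | false =>
        simp only [Bool.false_eq_true, if_false, hl, hl', Bool.and_false, Bool.false_and]
        rw [ih (cur ++ [op]) l l' false hl hl']

-- shift lemma for the counter carried by pvSegEnd
theorem pvSegEnd_shift (ops : List (List (String × String))) :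
    ∀ (last : Option String) (k : Nat),
    pvSegEnd ops last k = (pvSegEnd ops last 0).map (k + ·) := by
  induction ops with
  | nil => intro last k; rfl
  | cons op rest ih =>
    intro last k
    simp only [pvSegEnd]
    by_cases hg : (pvGet op "type" == some "navigate" && pvTruthy (pvGet op "url")
        && pvTruthy last && pvGet op "url" != last) = true
    · simp [hg]
    · rw [if_neg hg, if_neg hg, ih _ (k + 1), ih _ 1]
      cases pvSegEnd rest (if pvTruthy (pvGet op "url") then pvGet op "url" else last) 0 with
      | none => rfl
      | some j => simp; omega

-- pvSplitRec described by the break-scan: no break → one segment; break at k →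
-- the slice up to and including the navigate, then the p = true continuation
theorem pvScan_main (tail : List (List (String × String))) :
    ∀ (cur : List (List (String × String))) (l : Option String),
    pvSplitRec cur l false tail =
      match pvSegEnd tail l 0 with
      | none => [cur ++ tail]
      | some k =>
        (cur ++ tail.take (k + 1)) ::
          (match tail.drop (k + 1) with
           | [] => []
           | op :: r =>
             pvSplitRec [op]
               (if pvTruthy (pvGet op "url") then pvGet op "url"
                else pvGet (tail.getD k []) "url") false r) := by
  induction tail with
  | nil => intro cur l; simp [pvSplitRec, pvSegEnd]
  | cons op rest ih =>
    intro cur l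
    simp only [pvSegEnd, pvSplitRec, Bool.false_eq_true, if_false]
    by_cases hg : (pvGet op "type" == some "navigate" && pvTruthy (pvGet op "url")
        && pvTruthy l && pvGet op "url" != l) = true
    · rw [if_pos hg, if_pos hg]
      -- break at the head: k = 0, one p = true step
      cases rest with
      | nil => simp [pvSplitRec]
      | cons op2 r => simp [pvSplitRec]
    · rw [if_neg hg, if_neg hg]
      rw [ih (cur ++ [op]) (if pvTruthy (pvGet op "url") then pvGet op "url" else l)]
      rw [pvSegEnd_shift _ _ 1]
      cases hs : pvSegEnd rest (if pvTruthy (pvGet op "url") then pvGet op "url" else l) 0 with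
      | none => simp
      | some k =>
        simp [show 1 + k = k + 1 from Nat.add_comm 1 k, List.getD]

-- pvSegEnd returns an in-range index (for the getD justification in the bridge)
theorem pvSegEnd_lt (ops : List (List (String × String))) :
    ∀ (last : Option String) (k j : Nat), pvSegEnd ops last k = some j → j - k < ops.length := by
  induction ops with
  | nil => intro last k j h; simp [pvSegEnd] at h
  | cons op rest ih =>
    intro last k j h
    simp only [pvSegEnd] at h
    by_cases hg : (pvGet op "type" == some "navigate" && pvTruthy (pvGet op "url")
        && pvTruthy last && pvGet op "url" != last) = true
    · rw [if_pos hg] at h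
      simp at h
      simp [← h]
    · rw [if_neg hg] at h
      have := ih _ _ _ h
      simp only [List.length_cons]
      omega

-- bridge: pvBuild computes pvSplitRec with a fresh one-element segment
theorem pvBridge : ∀ (n : Nat) (tail : List (List (String × String)))
    (head : List (String × String)) (last : Option String), tail.length ≤ n →
    pvBuild (head :: tail) last =
      pvSplitRec [head]
        (if pvTruthy (pvGet head "url") then pvGet head "url" else last) false tail := by
  intro n
  induction n with
  | zero =>
    intro tail head last hlen
    have : tail = [] := by cases tail <;> simp_all
    subst this
    simp [pvBuild, pvSplitRec, pvSegEnd]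
  | succ n ih =>
    intro tail head last hlen
    rw [pvBuild]
    rw [pvScan_main tail [head] (if pvTruthy (pvGet head "url") then pvGet head "url" else last)]
    cases hs : pvSegEnd tail (if pvTruthy (pvGet head "url") then pvGet head "url" else last) 0 with
    | none => simp
    | some k =>
      simp only []
      cases hd : tail.drop (k + 1) with
      | nil => simp [pvBuild]
      | cons op2 r =>
        have hk : k < tail.length := by
          have := pvSegEnd_lt tail _ 0 k hs; simpa using this
        have hr : r.length ≤ n := by
          have h1 : (tail.drop (k + 1)).length = tail.length - (k + 1) := by
            simp
          rw [hd] at h1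
          simp only [List.length_cons] at h1
          omega
        rw [ih r op2 (pvGet (tail.getD k []) "url") hr]
        simp

-- ===== VERDICT (by name: the statement is the Claim_ definition above) =====
theorem split_by_url_py_spec : Claim_equal_split_by_url_py := by
  intro operations _
  unfold Spec_split_by_url_py split_by_url_py_alt
  cases operations with
  | nil => simp [split_by_url_py, pvBuild]
  | cons op0 rest =>
    unfold split_by_url_py
    have hA := pvA_eq rest [] [op0] (pvGet op0 "url") false (by simp)
    simp only [List.nil_append] at hA
    simp only at hA ⊢
    rw [hA, pvBridge rest.length rest op0 none le_rfl]
    cases hu : pvTruthy (pvGet op0 "url") with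
    | true => simp
    | false =>
      simp only [Bool.false_eq_true, if_false]
      exact pvSplitRec_falsy rest [op0] (pvGet op0 "url") none false hu rfl
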